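-- pv_equiv track=rewrite | github.com/mike88quinn/Common-Words-in-Book | common_words.py | book_dictionary_uncommon
-- ===== SOURCE A (Python) =====
-- def book_dictionary_uncommon(book):
--     common_words = {"the", "be", "to", "of", "and", "a", "in", "that", "have", "I", "it", "for", "not", "on", "with",
--                     "he", "as", "you", "do", "at", "this", "but", "his", "by", "from", "they", "we", "say", "her",
--                     "she", "or", "will", "an", "my", "one", "all", "would", "there", "their", "what", "so", "up", "out",
--                     "if", "about", "who", "get", "which", "go", "when", "me", "make", "can", "like", "time", "no",
--                     "just", "him", "know", "take", "person", "into", "year", "your", "good", "some", "could", "them",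
--                     "see", "other", "than", "then", "now", "look", "only", "come", "its", "over", "think", "also",
--                     "back", "after", "use", "two", "how", "our", "work", "first", "well", "way", "even", "new", "want",
--                     "because", "any", "these", "give", "day", "most", "us"}
--
--     # create a dictionary where the key is the word in the file and the value is the times it appears
--     result = {}
--     for element in book.split():
--         if element not in common_words:
--             if element not in result:
--                 result[element] = 1
--             else:
--                 result[element] += 1
--
--     return result
-- ===== SOURCE B (Python) =====
-- def book_dictionary_uncommon(book):
--     common_words = set(
--         "the be to of and a in that have I it for not on with he as you do at this but his by from "
--         "they we say her she or will an my one all would there their what so up out if about who get "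
--         "which go when me make can like time no just him know take person into year your good some "
--         "could them see other than then now look only come its over think also back after use two how "
--         "our work first well way even new want because any these give day most us".split())
--     words = [w for w in book.split() if w not in common_words]
--     return {w: words.count(w) for w in dict.fromkeys(words)}
-- ===== Notes on version B (the rewrite author's own statement) =====
-- stated objective: simpler
-- what changed: Replaces the incremental dict-tally loop (membership test, init-or-increment per word) with a filter pass followed by a dict comprehension counting each distinct word (dict.fromkeys for first-occurrence order); the common-word set is built by splitting one literal string instead of a 100-element set literal.
import Mathlib
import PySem

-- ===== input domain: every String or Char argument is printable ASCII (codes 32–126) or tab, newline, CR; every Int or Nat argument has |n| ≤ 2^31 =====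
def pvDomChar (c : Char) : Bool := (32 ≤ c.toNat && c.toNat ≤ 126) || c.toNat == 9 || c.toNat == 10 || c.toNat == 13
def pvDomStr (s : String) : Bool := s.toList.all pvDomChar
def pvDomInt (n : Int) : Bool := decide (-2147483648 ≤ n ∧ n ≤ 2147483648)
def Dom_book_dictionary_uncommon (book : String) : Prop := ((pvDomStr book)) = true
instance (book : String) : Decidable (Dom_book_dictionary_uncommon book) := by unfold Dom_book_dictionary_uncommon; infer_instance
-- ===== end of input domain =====

-- B replaces A's incremental dict tally with filter-once + count-per-distinct-word (simpler; not faster).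
-- ===== PORT A =====
-- A's common_words set literal
def pvCommonA : PySem.Set String := PySem.Set.ofList ["the", "be", "to", "of", "and", "a", "in", "that", "have", "I", "it", "for", "not", "on", "with", "he", "as", "you", "do", "at", "this", "but", "his", "by", "from", "they", "we", "say", "her", "she", "or", "will", "an", "my", "one", "all", "would", "there", "their", "what", "so", "up", "out", "if", "about", "who", "get", "which", "go", "when", "me", "make", "can", "like", "time", "no", "just", "him", "know", "take", "person", "into", "year", "your", "good", "some", "could", "them", "see", "other", "than", "then", "now", "look", "only", "come", "its", "over", "think", "also", "back", "after", "use", "two", "how", "our", "work", "first", "well", "way", "even", "new", "want", "because", "any", "these", "give", "day", "most", "us"]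

def book_dictionary_uncommon (book : String) : List (String × Int) :=
  ((PySem.Str.split₀ book).foldl
    (fun (result : PySem.Dict String Int) element =>
      if !pvCommonA.contains element then
        if !result.contains element then result.insert element 1
        else result.insert element (result.getD element 0 + 1)
      else result)
    PySem.Dict.empty).items

-- ===== PORT B =====
-- B builds its common-word set by splitting one string literal
def pvCommonB : PySem.Set String := PySem.Set.ofList (PySem.Str.split₀ "the be to of and a in that have I it for not on with he as you do at this but his by from they we say her she or will an my one all would there their what so up out if about who get which go when me make can like time no just him know take person into year your good some could them see other than then now look only come its over think also back after use two how our work first well way even new want because any these give day most us")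

def book_dictionary_uncommon_alt (book : String) : List (String × Int) :=
  let words := (PySem.Str.split₀ book).filter (fun w => !pvCommonB.contains w)
  (PySem.List.dedup words).map (fun w => (w, (words.count w : Int)))

-- ===== PRECONDITION & SPEC =====
def Spec_book_dictionary_uncommon (book : String) (out : List (String × Int)) : Prop := out = book_dictionary_uncommon_alt book
instance (book : String) (out : List (String × Int)) : Decidable (Spec_book_dictionary_uncommon book out) := by unfold Spec_book_dictionary_uncommon; infer_instance

-- ===== CLAIM (what is proved, stated in full; the proofs are below) =====
def Claim_equal_book_dictionary_uncommon : Prop := ∀ (book : String), Dom_book_dictionary_uncommon book → Spec_book_dictionary_uncommon book (book_dictionary_uncommon book)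

-- ===== LEMMAS AND PROOFS =====
-- B's runtime-split common-word set equals A's literal set
set_option maxRecDepth 10000 in
theorem pv_common_eq : pvCommonB = pvCommonA := by rfl

-- ===== VERDICT (by name: the statement is the Claim_ definition above) =====
theorem book_dictionary_uncommon_spec : Claim_equal_book_dictionary_uncommon := by
  intro book _
  unfold Spec_book_dictionary_uncommon book_dictionary_uncommon book_dictionary_uncommon_alt
  rw [show pvCommonB = pvCommonA from pv_common_eq]
  rw [PySem.List.foldl_if_eq_foldl_filter]
  have hfun : (fun (result : PySem.Dict String Int) element =>
      if !result.contains element then result.insert element 1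
      else result.insert element (result.getD element 0 + 1))
      = fun (d : PySem.Dict String Int) e => d.insert e (d.getD e 0 + 1) := by
    funext d e
    by_cases h : d.contains e = true
    · simp [h]
    · have h' : d.contains e = false := by simpa using h
      have hg : d.get? e = none := by
        have hc := PySem.Dict.contains_eq_isSome_get? d e
        rw [h'] at hc
        exact Option.not_isSome_iff_eq_none.mp (by simp [← hc])
      simp [h', PySem.Dict.getD, hg]
  rw [hfun]
  rw [PySem.Dict.foldl_insert_getD_add_one_eq_counter, PySem.Dict.items_counter]
  simp
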